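-- pv_equiv track=rewrite | github.com/aAAaqwq/auto_geo | backend/services/playwright/publishers/toutiao.py | _split_content_to_chunks
-- ===== SOURCE A (Python) =====
-- from typing import Dict, Any, List, Optional
--
-- def _split_content_to_chunks(content: str, num_chunks: int = 4) -> List[str]:
--     """将内容按换行符切成指定数量的块"""
--     lines = [line.strip() for line in content.split("\n") if line.strip()]
--     if not lines:
--         return [""] * num_chunks
--
--     chunk_size = max(1, len(lines) // num_chunks)
--     chunks = []
--     for i in range(num_chunks):
--         start = i * chunk_size
--         end = (i + 1) * chunk_size if i < num_chunks - 1 else len(lines)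
--         chunk_lines = lines[start:end]
--         chunks.append("\n".join(chunk_lines))
--     return chunks
-- ===== SOURCE B (Python) =====
-- def _split_content_to_chunks(content: str, num_chunks: int = 4):
--     """Peel chunk_size lines off a shrinking rest list instead of slicing by index arithmetic."""
--     lines = [line.strip() for line in content.split("\n") if line.strip()]
--     if not lines:
--         return [""] * num_chunks
--
--     chunk_size = max(1, len(lines) // num_chunks)
--     chunks = []
--     rest = lines
--     for _ in range(num_chunks - 1):
--         chunks.append("\n".join(rest[:chunk_size]))
--         rest = rest[chunk_size:]
--     chunks.append("\n".join(rest))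
--     return chunks
-- ===== Notes on version B (the rewrite author's own statement) =====
-- stated objective: alternative
-- what changed: B peels chunk_size lines off a single shrinking rest list (one structural pass, last chunk takes whatever remains) instead of computing start/end indices and slicing the full lines list for each chunk.
-- outside the precondition, e.g. on _split_content_to_chunks('a\nb', -2): A returns [], B returns ['a\nb']
import Mathlib
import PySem

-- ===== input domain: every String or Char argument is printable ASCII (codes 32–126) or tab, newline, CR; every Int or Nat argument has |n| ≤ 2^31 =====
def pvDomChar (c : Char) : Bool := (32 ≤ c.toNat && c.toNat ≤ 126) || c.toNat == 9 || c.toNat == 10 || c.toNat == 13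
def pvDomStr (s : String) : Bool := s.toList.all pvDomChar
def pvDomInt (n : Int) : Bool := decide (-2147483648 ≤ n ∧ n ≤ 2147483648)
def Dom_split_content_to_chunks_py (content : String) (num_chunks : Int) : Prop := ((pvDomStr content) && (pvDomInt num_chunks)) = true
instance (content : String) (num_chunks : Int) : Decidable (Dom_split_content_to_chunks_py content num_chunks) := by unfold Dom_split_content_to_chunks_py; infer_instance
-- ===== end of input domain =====

-- B peels chunk_size lines off a shrinking rest list (one structural pass) instead of
-- computing start/end indices and slicing the full list per chunk; objective: alternative.

-- ===== PORT A =====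
-- shared input preprocessing, the literal first line of both Pythons:
-- [line.strip() for line in content.split("\n") if line.strip()]
def pvLines (content : String) : List String :=
  -- content.split("\n"): sep is the nonempty literal "\n", so split? is always `some`; getD is exact here
  ((PySem.Str.split? content "\n").getD []).filterMap
    (fun line => let s := PySem.Str.strip line; if s ≠ "" then some s else none)

def split_content_to_chunks_py (content : String) (num_chunks : Int) : List String :=
  let lines := pvLines content
  if lines = [] then List.replicate num_chunks.toNat "" else
  let chunk_size : Int := max 1 (PySem.Int.floordiv (lines.length : Int) num_chunks)
  (PySem.List.pyRange 0 num_chunks 1).foldl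
    (fun chunks i =>
      let start := i * chunk_size
      let stop := if i < num_chunks - 1 then (i + 1) * chunk_size else (lines.length : Int)
      let chunk_lines := PySem.List.slice lines (some start) (some stop)
      chunks ++ [PySem.Str.join "\n" chunk_lines]) []

-- ===== PORT B =====
def split_content_to_chunks_py_alt (content : String) (num_chunks : Int) : List String :=
  let lines := pvLines content
  if lines = [] then List.replicate num_chunks.toNat "" else
  let chunk_size : Int := max 1 (PySem.Int.floordiv (lines.length : Int) num_chunks)
  let st := (PySem.List.pyRange 0 (num_chunks - 1) 1).foldl
    (fun (st : List String × List String) _ =>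
      (st.1 ++ [PySem.Str.join "\n" (PySem.List.slice st.2 none (some chunk_size))],
       PySem.List.slice st.2 (some chunk_size) none)) ([], lines)
  st.1 ++ [PySem.Str.join "\n" st.2]

-- ===== PRECONDITION & SPEC =====
-- Pre_ excludes num_chunks ≤ 0 on content with at least one non-blank line: a non-positive
-- chunk count is outside the function's purpose there — A raises ZeroDivisionError at 0 and
-- returns an accidental [] (empty range) for negatives, while B returns the content as one chunk.
def Pre_split_content_to_chunks_py (content : String) (num_chunks : Int) : Prop :=
  1 ≤ num_chunks ∨ pvLines content = []
instance (content : String) (num_chunks : Int) : Decidable (Pre_split_content_to_chunks_py content num_chunks) := by unfold Pre_split_content_to_chunks_py; infer_instance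

def pvWitness_split_content_to_chunks_py : String × Int := ("a\nb\nc", 2)

def Spec_split_content_to_chunks_py (content : String) (num_chunks : Int) (out : List String) : Prop := out = split_content_to_chunks_py_alt content num_chunks
instance (content : String) (num_chunks : Int) (out : List String) : Decidable (Spec_split_content_to_chunks_py content num_chunks out) := by unfold Spec_split_content_to_chunks_py; infer_instance

-- ===== CLAIM (what is proved, stated in full; the proofs are below) =====
def Claim_equal_split_content_to_chunks_py : Prop := ∀ (content : String) (num_chunks : Int), Dom_split_content_to_chunks_py content num_chunks → Pre_split_content_to_chunks_py content num_chunks → Spec_split_content_to_chunks_py content num_chunks (split_content_to_chunks_py content num_chunks)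

-- ===== LEMMAS AND PROOFS =====

-- B's peeling loop, in Nat form: after M rounds the emitted chunks are the M successive
-- windows of width C and the rest is what remains.
theorem pv_peel (C : ℕ) (M : ℕ) (L acc : List String) :
    (List.range M).foldl
      (fun (st : List String × List String) _ =>
        (st.1 ++ [PySem.Str.join "\n" (st.2.take C)], st.2.drop C)) (acc, L)
    = (acc ++ (List.range M).map (fun k => PySem.Str.join "\n" ((L.drop (k * C)).take C)),
       L.drop (M * C)) := by
  induction M generalizing acc with
  | zero => simp
  | succ m ih =>
    rw [List.range_succ, List.foldl_append, ih]
    simp [List.drop_drop, Nat.succ_mul, Nat.add_comm]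

-- ===== VERDICT (by name: the statement is the Claim_ definition above) =====
-- a loop that appends one element per iteration is a map
theorem pv_fold_map (f : Int → String) (l : List Int) (acc : List String) :
    l.foldl (fun chunks i => chunks ++ [f i]) acc = acc ++ l.map f := by
  induction l generalizing acc with
  | nil => simp
  | cons x xs ih => simp [ih]

theorem split_content_to_chunks_py_spec : Claim_equal_split_content_to_chunks_py := by
  intro content num_chunks _hdom hpre
  unfold Spec_split_content_to_chunks_py split_content_to_chunks_py split_content_to_chunks_py_alt
  by_cases hl : pvLines content = []
  · simp [hl]
  · simp only [hl, if_false]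
    have hn : 1 ≤ num_chunks := by
      rcases hpre with h | h
      · exact h
      · exact absurd h hl
    -- names
    set L := pvLines content with hLdef
    set len : ℕ := L.length with hlen
    -- chunk_size as a Nat
    have hn0 : (0:Int) < num_chunks := by omega
    obtain ⟨N, hN⟩ : ∃ N : ℕ, num_chunks = (N : Int) := ⟨num_chunks.toNat, by omega⟩
    have hN1 : 1 ≤ N := by omega
    have hfd : PySem.Int.floordiv (len : Int) num_chunks = ((len / N : ℕ) : Int) := by
      rw [hN]; exact PySem.Int.floordiv_natCast len N
    set C : ℕ := max 1 (len / N) with hCdef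
    have hcs : max 1 (PySem.Int.floordiv (len : Int) num_chunks) = (C : Int) := by
      rw [hfd, hCdef]; push_cast; omega
    have hC1 : 1 ≤ C := le_max_left _ _
    rw [hcs]
    -- B side: turn the pyRange into List.range and apply pv_peel
    have hrangeB : PySem.List.pyRange 0 (num_chunks - 1) 1
        = (List.range (N - 1)).map (fun k => ((k : ℕ) : Int)) := by
      rw [PySem.List.pyRange_one]
      have : (num_chunks - 1 - 0).toNat = N - 1 := by omega
      rw [this]
      simp
    rw [hrangeB, List.foldl_map]
    have hsliceto : ∀ xs : List String, PySem.List.slice xs none (some (C : Int)) = xs.take C := by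
      intro xs
      rw [PySem.List.slice_to xs (Int.natCast_nonneg C)]
      simp
    have hslicefrom : ∀ xs : List String, PySem.List.slice xs (some (C : Int)) none = xs.drop C := by
      intro xs
      rw [PySem.List.slice_from xs (Int.natCast_nonneg C)]
      simp
    simp only [hsliceto, hslicefrom]
    rw [pv_peel C (N - 1) L []]
    -- A side: split the range at num_chunks - 1
    have hrangeA : PySem.List.pyRange 0 num_chunks 1
        = PySem.List.pyRange 0 (num_chunks - 1) 1 ++ [num_chunks - 1] := by
      rw [PySem.List.pyRange_one_append 0 (num_chunks - 1) num_chunks (by omega) (by omega)]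
      congr 1
      rw [PySem.List.pyRange_one_cons (by omega), PySem.List.pyRange_one_eq_nil (by omega)]
    rw [hrangeA, List.foldl_append]
    -- middle chunks of A
    have hmid : ∀ (i : Int), i ∈ PySem.List.pyRange 0 (num_chunks - 1) 1 →
        PySem.List.slice L (some (i * (C:Int)))
          (some (if i < num_chunks - 1 then (i + 1) * (C:Int) else (len : Int)))
        = (L.drop (i.toNat * C)).take C := by
      intro i hi
      rw [PySem.List.mem_pyRange_one] at hi
      have h1 : i < num_chunks - 1 := hi.2
      rw [if_pos h1]
      obtain ⟨k, hk⟩ : ∃ k : ℕ, i = (k : ℕ) := ⟨i.toNat, by omega⟩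
      subst hk
      have : ((k:Int) + 1) * (C:Int) = (((k+1) * C : ℕ) : Int) := by push_cast; ring
      rw [this]
      have : (k:Int) * (C:Int) = ((k * C : ℕ) : Int) := by push_cast; ring
      rw [this, PySem.List.slice_natCast L]
      have h2 : (k + 1) * C - k * C = C := by
        rw [Nat.add_mul, one_mul, Nat.add_sub_cancel_left]
      simp [h2]
    have hfold := PySem.List.foldl_congr_mem (PySem.List.pyRange 0 (num_chunks - 1) 1)
      (fun chunks i => chunks ++ [PySem.Str.join "\n"
        (PySem.List.slice L (some (i * (C:Int)))
          (some (if i < num_chunks - 1 then (i + 1) * (C:Int) else (len : Int))))])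
      (fun chunks i => chunks ++ [PySem.Str.join "\n" ((L.drop (i.toNat * C)).take C)])
      [] (fun acc i hi => by simp only [hmid i hi])
    rw [hfold]
    simp only [List.foldl_cons, List.foldl_nil]
    -- last chunk of A
    have hlast : PySem.List.slice L (some ((num_chunks - 1) * (C:Int)))
        (some (if num_chunks - 1 < num_chunks - 1 then (num_chunks - 1 + 1) * (C:Int) else (len : Int)))
        = L.drop ((N - 1) * C) := by
      rw [if_neg (lt_irrefl _)]
      have h1 : (num_chunks - 1) * (C:Int) = (((N-1) * C : ℕ) : Int) := by
        rw [hN]; push_cast [Nat.cast_sub hN1]; ring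
      rw [h1, PySem.List.slice_natCast L]
      exact List.take_of_length_le (by simp [hlen])
    rw [hlast]
    rw [pv_fold_map]
    -- align the two map forms
    rw [PySem.List.pyRange_one]
    have hNN : (num_chunks - 1 - 0).toNat = N - 1 := by omega
    rw [hNN]
    simp only [List.map_map, List.nil_append]
    congr 1
    apply List.map_congr_left
    intro k _
    simp
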